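-- pv_equiv track=rewrite | github.com/rajakotak/raikiri | tampilan.py | rot13_encryption
-- ===== SOURCE A (Python) =====
-- def rot13_encryption(message):
--     encrypted_text = ""
--     for char in message:
--         if char.isalpha():
--             temp = ord(char) + 13
--             if char.islower() and temp > ord('z'):
--                 temp -= 26
--             elif char.isupper() and temp > ord('Z'):
--                 temp -= 26
--             encrypted_text += chr(temp)
--         else:
--             encrypted_text += char
--     return encrypted_text
-- ===== SOURCE B (Python) =====
-- _LOWER = "abcdefghijklmnopqrstuvwxyz"
-- _UPPER = _LOWER.upper()
-- _TABLE = str.maketrans(_LOWER + _UPPER,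
--                        _LOWER[13:] + _LOWER[:13] + _UPPER[13:] + _UPPER[:13])
--
-- def rot13_encryption(message):
--     return message.translate(_TABLE)
-- ===== Notes on version B (the rewrite author's own statement) =====
-- stated objective: idiomatic
-- what changed: Replaces the per-character branch-and-ord-arithmetic loop with a translation table built once via str.maketrans and a single message.translate(table) pass; non-letters are absent from the table and pass through unchanged.
import Mathlib
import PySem

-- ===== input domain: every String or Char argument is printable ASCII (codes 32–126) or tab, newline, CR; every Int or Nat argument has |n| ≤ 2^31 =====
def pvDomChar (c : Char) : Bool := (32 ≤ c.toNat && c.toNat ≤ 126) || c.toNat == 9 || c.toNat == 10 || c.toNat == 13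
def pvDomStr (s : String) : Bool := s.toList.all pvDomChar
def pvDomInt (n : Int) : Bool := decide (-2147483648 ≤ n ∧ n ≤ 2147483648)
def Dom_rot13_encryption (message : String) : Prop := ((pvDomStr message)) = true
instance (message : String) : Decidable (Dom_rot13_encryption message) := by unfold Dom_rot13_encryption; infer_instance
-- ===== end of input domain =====

-- B replaces A's per-character branch-and-ord-arithmetic loop by a translation table
-- built once and a single table-driven pass (idiomatic; same cost).

-- ===== PORT A =====
def rot13_encryption (message : String) : String :=
  String.mk (message.toList.foldl (fun acc char =>
    if PySem.Chars.isalpha char then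
      let temp := char.toNat + 13
      let temp :=
        if PySem.Chars.islower char && decide (temp > 'z'.toNat) then temp - 26
        else if PySem.Chars.isupper char && decide (temp > 'Z'.toNat) then temp - 26
        else temp
      acc ++ [Char.ofNat temp]
    else acc ++ [char]) [])

-- ===== PORT B =====
def pvLower : List Char := "abcdefghijklmnopqrstuvwxyz".toList
def pvUpper : List Char := "ABCDEFGHIJKLMNOPQRSTUVWXYZ".toList
-- str.maketrans(lower+upper, lower[13:]+lower[:13]+upper[13:]+upper[:13]) as a Dict
def pvTable : PySem.Dict Char Char :=
  PySem.Dict.ofList ((pvLower ++ pvUpper).zip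
    (pvLower.drop 13 ++ pvLower.take 13 ++ pvUpper.drop 13 ++ pvUpper.take 13))
-- message.translate(table): chars absent from the table pass through unchanged
def rot13_encryption_alt (message : String) : String :=
  String.mk (message.toList.map (fun c => pvTable.getD c c))

-- ===== PRECONDITION & SPEC =====
def Spec_rot13_encryption (message : String) (out : String) : Prop := out = rot13_encryption_alt message
instance (message : String) (out : String) : Decidable (Spec_rot13_encryption message out) := by unfold Spec_rot13_encryption; infer_instance

-- ===== CLAIM (what is proved, stated in full; the proofs are below) =====
def Claim_equal_rot13_encryption : Prop := ∀ (message : String), Dom_rot13_encryption message → Spec_rot13_encryption message (rot13_encryption message)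

-- ===== LEMMAS AND PROOFS =====

-- A's per-character transform, named for the proof
def pvStepA (char : Char) : Char :=
  if PySem.Chars.isalpha char then
    let temp := char.toNat + 13
    let temp :=
      if PySem.Chars.islower char && decide (temp > 'z'.toNat) then temp - 26
      else if PySem.Chars.isupper char && decide (temp > 'Z'.toNat) then temp - 26
      else temp
    Char.ofNat temp
  else char

theorem foldA_eq_map (l : List Char) (acc : List Char) :
    l.foldl (fun acc char =>
      if PySem.Chars.isalpha char then
        let temp := char.toNat + 13
        let temp :=
          if PySem.Chars.islower char && decide (temp > 'z'.toNat) then temp - 26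
          else if PySem.Chars.isupper char && decide (temp > 'Z'.toNat) then temp - 26
          else temp
        acc ++ [Char.ofNat temp]
      else acc ++ [char]) acc = acc ++ l.map pvStepA := by
  induction l generalizing acc with
  | nil => simp
  | cons c t ih =>
    simp only [List.foldl_cons, List.map_cons, ih]
    by_cases h : PySem.Chars.isalpha c = true <;> simp [pvStepA, h]

set_option maxRecDepth 100000 in
theorem stepA_eq_table_of_dom (c : Char) (h : pvDomChar c = true) :
    pvStepA c = pvTable.getD c c := by
  have hb : c.toNat < 127 := by
    simp only [pvDomChar, Bool.or_eq_true, Bool.and_eq_true, decide_eq_true_eq,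
      beq_iff_eq] at h
    omega
  have hc : c = Char.ofNat c.toNat := (Char.ofNat_toNat c).symm
  rw [hc]
  have key : ∀ n : Nat, n < 127 →
      pvStepA (Char.ofNat n) = pvTable.getD (Char.ofNat n) (Char.ofNat n) := by decide
  exact key c.toNat hb

-- ===== VERDICT (by name: the statement is the Claim_ definition above) =====
set_option maxRecDepth 100000 in
theorem rot13_encryption_spec : Claim_equal_rot13_encryption := by
  intro message hdom
  unfold Spec_rot13_encryption rot13_encryption rot13_encryption_alt
  rw [foldA_eq_map]
  simp only [List.nil_append]
  congr 1
  apply List.map_congr_left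
  intro c hc
  have : pvDomChar c = true := by
    have := hdom
    unfold Dom_rot13_encryption pvDomStr at this
    exact List.all_eq_true.mp this c hc
  exact stepA_eq_table_of_dom c this
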